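-- pv_equiv track=rewrite | github.com/HatimMuqbel/Decisiongraph-core-v1.3 | decisiongraph-complete/src/domains/insurance_claims/seed_generator.py | _schema_for_codes
-- ===== SOURCE A (Python) =====
-- def _schema_for_codes(codes: list[str]) -> str:
--     """Pick fingerprint schema from reason code prefixes."""
--     prefixes = {c.split("-")[1].upper() for c in codes if c.startswith("RC-") and "-" in c}
--     if "SIU" in prefixes:
--         return "decisiongraph:insurance:siu:v1"
--     if "FRD" in prefixes:
--         return "decisiongraph:insurance:fraud:v1"
--     if "INJ" in prefixes:
--         return "decisiongraph:insurance:injury:v1"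
--     if "POL" in prefixes:
--         return "decisiongraph:insurance:policy:v1"
--     return "decisiongraph:insurance:claims:v1"
-- ===== SOURCE B (Python) =====
-- _TABLE = [
--     ("SIU", "decisiongraph:insurance:siu:v1"),
--     ("FRD", "decisiongraph:insurance:fraud:v1"),
--     ("INJ", "decisiongraph:insurance:injury:v1"),
--     ("POL", "decisiongraph:insurance:policy:v1"),
-- ]
--
--
-- def _schema_for_codes(codes: list[str]) -> str:
--     """Pick fingerprint schema from reason code prefixes."""
--     for prefix, schema in _TABLE:
--         if any(c.startswith("RC-") and "-" in c and c.split("-")[1].upper() == prefix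
--                for c in codes):
--             return schema
--     return "decisiongraph:insurance:claims:v1"
-- ===== Notes on version B (the rewrite author's own statement) =====
-- stated objective: simpler
-- what changed: Replaces A's build-a-prefix-set-then-membership-chain with a precedence table scanned in order, returning the first schema whose prefix some code matches directly; no intermediate set is built.
import Mathlib
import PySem

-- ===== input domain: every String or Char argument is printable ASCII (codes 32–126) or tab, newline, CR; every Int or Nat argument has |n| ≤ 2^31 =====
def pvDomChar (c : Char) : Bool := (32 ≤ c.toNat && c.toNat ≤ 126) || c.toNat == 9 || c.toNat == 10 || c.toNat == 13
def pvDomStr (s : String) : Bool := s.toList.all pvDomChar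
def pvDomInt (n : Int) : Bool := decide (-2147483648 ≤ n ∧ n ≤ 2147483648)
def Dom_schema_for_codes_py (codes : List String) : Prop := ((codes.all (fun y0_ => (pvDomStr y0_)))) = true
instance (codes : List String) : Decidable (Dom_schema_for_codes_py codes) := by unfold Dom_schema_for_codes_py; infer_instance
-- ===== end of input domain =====

-- B replaces A's build-a-prefix-set-then-membership-chain with an in-order precedence table
-- scanned directly against the codes (simpler; no intermediate set).


-- ===== PORT A =====
-- guard of A's set comprehension: c.startswith("RC-") and "-" in c
def pvAGuard (c : String) : Bool :=
  PySem.Str.startswith c "RC-" && PySem.Str.isIn "-" c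
-- c.split("-")[1].upper(); the default "" of pyGetD is unreachable under pvAGuard
def pvAPref (c : String) : String :=
  PySem.Str.upper (PySem.List.pyGetD ((PySem.Str.split? c "-").getD []) 1 "")

def schema_for_codes_py (codes : List String) : String :=
  let prefixes : PySem.Set String :=
    codes.foldl (fun s c => if pvAGuard c then PySem.Set.add s (pvAPref c) else s) PySem.Set.empty
  if PySem.Set.contains prefixes "SIU" then "decisiongraph:insurance:siu:v1"
  else if PySem.Set.contains prefixes "FRD" then "decisiongraph:insurance:fraud:v1"
  else if PySem.Set.contains prefixes "INJ" then "decisiongraph:insurance:injury:v1"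
  else if PySem.Set.contains prefixes "POL" then "decisiongraph:insurance:policy:v1"
  else "decisiongraph:insurance:claims:v1"

-- ===== PORT B =====
def pvTable : List (String × String) :=
  [("SIU", "decisiongraph:insurance:siu:v1"),
   ("FRD", "decisiongraph:insurance:fraud:v1"),
   ("INJ", "decisiongraph:insurance:injury:v1"),
   ("POL", "decisiongraph:insurance:policy:v1")]

-- the generator's match predicate, per code and prefix
def pvBMatch (c : String) (prefix_ : String) : Bool :=
  PySem.Str.startswith c "RC-" && PySem.Str.isIn "-" c &&
    (PySem.Str.upper (PySem.List.pyGetD ((PySem.Str.split? c "-").getD []) 1 "") == prefix_)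

def schema_for_codes_py_alt (codes : List String) : String :=
  match pvTable.find? (fun e => codes.any (fun c => pvBMatch c e.1)) with
  | some e => e.2
  | none => "decisiongraph:insurance:claims:v1"

-- ===== PRECONDITION & SPEC =====
def Spec_schema_for_codes_py (codes : List String) (out : String) : Prop := out = schema_for_codes_py_alt codes
instance (codes : List String) (out : String) : Decidable (Spec_schema_for_codes_py codes out) := by unfold Spec_schema_for_codes_py; infer_instance

-- ===== CLAIM (what is proved, stated in full; the proofs are below) =====
def Claim_equal_schema_for_codes_py : Prop := ∀ (codes : List String), Dom_schema_for_codes_py codes → Spec_schema_for_codes_py codes (schema_for_codes_py codes)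

-- ===== LEMMAS AND PROOFS =====

-- A's set membership test for a prefix p equals B's direct scan of the codes
theorem pv_contains_eq_any (codes : List String) (p : String) :
    PySem.Set.contains
      (codes.foldl (fun s c => if pvAGuard c then PySem.Set.add s (pvAPref c) else s)
        PySem.Set.empty) p
      = codes.any (fun c => pvBMatch c p) := by
  have h1 : codes.foldl (fun s c => if pvAGuard c then PySem.Set.add s (pvAPref c) else s)
      PySem.Set.empty
      = (codes.filter pvAGuard).foldl (fun s c => PySem.Set.add s (pvAPref c)) PySem.Set.empty := by
    rw [PySem.List.foldl_if_eq_foldl_filter]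
  have h2 : (codes.filter pvAGuard).foldl (fun s c => PySem.Set.add s (pvAPref c)) PySem.Set.empty
      = PySem.Set.ofList ((codes.filter pvAGuard).map pvAPref) := by
    rw [PySem.Set.ofList_eq_foldl, List.foldl_map]; rfl
  rw [h1, h2]
  rcases hb : codes.any (fun c => pvBMatch c p) with _ | _
  · simp only [List.any_eq_false] at hb
    apply Bool.not_eq_true _ |>.mp
    intro hc
    have hmem : p ∈ (codes.filter pvAGuard).map pvAPref := by
      simpa [PySem.Set.contains, PySem.Set.mem_ofList] using hc
    rcases List.mem_map.mp hmem with ⟨c, hc', rfl⟩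
    rcases List.mem_filter.mp hc' with ⟨hcm, hg⟩
    have hb' := hb c hcm
    simp only [pvAGuard, Bool.and_eq_true] at hg
    simp only [pvBMatch, pvAPref, Bool.and_eq_true, beq_iff_eq, hg.1, hg.2, true_and] at hb'
    simp at hb'
  · simp only [List.any_eq_true] at hb
    rcases hb with ⟨c, hcm, hm⟩
    simp only [pvBMatch, Bool.and_eq_true, beq_iff_eq] at hm
    have hmem : p ∈ (codes.filter pvAGuard).map pvAPref := by
      refine List.mem_map.mpr ⟨c, List.mem_filter.mpr ⟨hcm, ?_⟩, ?_⟩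
      · simp only [pvAGuard, Bool.and_eq_true]; exact hm.1
      · simpa [pvAPref] using hm.2
    simpa [PySem.Set.contains, PySem.Set.mem_ofList] using hmem

-- ===== VERDICT (by name: the statement is the Claim_ definition above) =====
theorem schema_for_codes_py_spec : Claim_equal_schema_for_codes_py := by
  intro codes _
  unfold Spec_schema_for_codes_py schema_for_codes_py schema_for_codes_py_alt
  simp only [pv_contains_eq_any, pvTable, List.find?]
  rcases h1 : codes.any (fun c => pvBMatch c "SIU") <;>
    rcases h2 : codes.any (fun c => pvBMatch c "FRD") <;>
      rcases h3 : codes.any (fun c => pvBMatch c "INJ") <;>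
        rcases h4 : codes.any (fun c => pvBMatch c "POL") <;>
          rfl
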